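-- pv_equiv track=rewrite | github.com/FA-MCostantini/bad-skills | php82-dev-skill/scripts/generate_php_dto.py | collect_uses
-- ===== SOURCE A (Python) =====
-- USE_MAP: dict[str, str] = {
--     "DateTimeImmutable": "use DateTimeImmutable;",
--     "DateTimeInterface": "use DateTimeInterface;",
--     "DateTime": "use DateTime;",
-- }
--
-- def collect_uses(prop_types: list[str]) -> list[str]:
--     uses = set()
--     for t in prop_types:
--         bare = t.lstrip("?")
--         if bare in USE_MAP:
--             uses.add(USE_MAP[bare])
--     if uses:
--         uses_sorted = sorted(uses)
--         return uses_sorted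
--     return []
-- ===== SOURCE B (Python) =====
-- USE_MAP: dict[str, str] = {
--     "DateTimeImmutable": "use DateTimeImmutable;",
--     "DateTimeInterface": "use DateTimeInterface;",
--     "DateTime": "use DateTime;",
-- }
--
-- def collect_uses(prop_types: list[str]) -> list[str]:
--     bare = {t.lstrip("?") for t in prop_types}
--     result = [use for key, use in USE_MAP.items() if key in bare]
--     return sorted(result)
-- ===== Notes on version B (the rewrite author's own statement) =====
-- stated objective: simpler
-- what changed: B builds the set of bare input types once and then drives the loop over USE_MAP's items (collecting values whose key appears in that set), instead of scanning prop_types and testing/looking up the map per element; the explicit set accumulator and the empty-check branch disappear.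
import Mathlib
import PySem

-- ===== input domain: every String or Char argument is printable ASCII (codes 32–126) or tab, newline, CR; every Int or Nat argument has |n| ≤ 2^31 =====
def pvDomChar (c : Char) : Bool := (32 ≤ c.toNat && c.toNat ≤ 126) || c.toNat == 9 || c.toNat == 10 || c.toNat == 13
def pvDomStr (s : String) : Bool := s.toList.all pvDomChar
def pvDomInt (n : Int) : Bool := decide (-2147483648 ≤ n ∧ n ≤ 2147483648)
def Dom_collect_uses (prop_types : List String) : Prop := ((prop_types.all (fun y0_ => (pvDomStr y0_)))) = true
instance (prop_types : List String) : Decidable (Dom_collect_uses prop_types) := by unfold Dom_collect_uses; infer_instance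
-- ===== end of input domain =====

-- B inverts the driving loop: it indexes the inputs once as a set of bare types and scans the fixed USE_MAP, instead of scanning the inputs and probing the map per element (objective: simpler).

-- shared module constant USE_MAP (a dict literal, insertion order kept)
def pvUseMap : PySem.Dict String String :=
  PySem.Dict.ofList
    [("DateTimeImmutable", "use DateTimeImmutable;"),
     ("DateTimeInterface", "use DateTimeInterface;"),
     ("DateTime", "use DateTime;")]

-- exact hand port of Python's t.lstrip("?"): drop the leading '?' characters
def pvLstripQ (t : String) : String := String.ofList (t.toList.dropWhile (fun c => c == '?'))

-- ===== PORT A =====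
def collect_uses (prop_types : List String) : List String :=
  let uses : PySem.Set String :=
    prop_types.foldl (fun uses t =>
      let bare := pvLstripQ t
      if pvUseMap.contains bare then PySem.Set.add uses (pvUseMap.getD bare "") else uses)
      PySem.Set.empty
  if uses ≠ ([] : List String) then
    let uses_sorted := PySem.List.sorted uses (fun x => x) false
    uses_sorted
  else []

-- ===== PORT B =====
def collect_uses_alt (prop_types : List String) : List String :=
  let bare : PySem.Set String := PySem.Set.ofList (prop_types.map pvLstripQ)
  let result : List String :=
    pvUseMap.items.filterMap (fun kv =>
      if PySem.Set.contains bare kv.1 then some kv.2 else none)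
  PySem.List.sorted result (fun x => x) false

-- ===== PRECONDITION & SPEC =====
def Spec_collect_uses (prop_types : List String) (out : List String) : Prop := out = collect_uses_alt prop_types
instance (prop_types : List String) (out : List String) : Decidable (Spec_collect_uses prop_types out) := by unfold Spec_collect_uses; infer_instance

-- ===== CLAIM (what is proved, stated in full; the proofs are below) =====
def Claim_equal_collect_uses : Prop := ∀ (prop_types : List String), Dom_collect_uses prop_types → Spec_collect_uses prop_types (collect_uses prop_types)

-- ===== LEMMAS AND PROOFS =====

-- the literal dict behind pvUseMap
lemma pv_map_eq : pvUseMap =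
    PySem.Dict.mk [("DateTimeImmutable", "use DateTimeImmutable;"),
     ("DateTimeInterface", "use DateTimeInterface;"),
     ("DateTime", "use DateTime;")] := PySem.Dict.ext rfl

-- contains/getD on the literal USE_MAP, characterised
lemma pv_map_char (s x : String) :
    (pvUseMap.contains s = true ∧ pvUseMap.getD s "" = x) ↔
    (s = "DateTimeImmutable" ∧ x = "use DateTimeImmutable;") ∨
    (s = "DateTimeInterface" ∧ x = "use DateTimeInterface;") ∨
    (s = "DateTime" ∧ x = "use DateTime;") := by
  by_cases h1 : s = "DateTimeImmutable"
  · subst h1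
    simp [show pvUseMap.contains "DateTimeImmutable" = true from rfl,
          show pvUseMap.getD "DateTimeImmutable" "" = "use DateTimeImmutable;" from rfl, eq_comm]
  · by_cases h2 : s = "DateTimeInterface"
    · subst h2
      simp [show pvUseMap.contains "DateTimeInterface" = true from rfl,
            show pvUseMap.getD "DateTimeInterface" "" = "use DateTimeInterface;" from rfl, eq_comm]
    · by_cases h3 : s = "DateTime"
      · subst h3
        simp [show pvUseMap.contains "DateTime" = true from rfl,
              show pvUseMap.getD "DateTime" "" = "use DateTime;" from rfl, eq_comm]
      · have g1 : ("DateTimeImmutable" == s) = false := by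
          simp only [beq_eq_false_iff_ne, ne_eq]; exact fun h => h1 h.symm
        have g2 : ("DateTimeInterface" == s) = false := by
          simp only [beq_eq_false_iff_ne, ne_eq]; exact fun h => h2 h.symm
        have g3 : ("DateTime" == s) = false := by
          simp only [beq_eq_false_iff_ne, ne_eq]; exact fun h => h3 h.symm
        have hc : pvUseMap.contains s = false := by
          rw [pv_map_eq, PySem.Dict.contains_mk]
          simp [List.any_cons, List.any_nil, g1, g2, g3]
        simp [hc, h1, h2, h3]

-- membership in A's fold-built set
lemma pv_mem_fold (pts : List String) (acc : List String) (x : String) :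
    x ∈ pts.foldl (fun uses t =>
      if pvUseMap.contains (pvLstripQ t) then PySem.Set.add uses (pvUseMap.getD (pvLstripQ t) "") else uses) acc ↔
    x ∈ acc ∨ ∃ t ∈ pts, pvUseMap.contains (pvLstripQ t) = true ∧ pvUseMap.getD (pvLstripQ t) "" = x := by
  induction pts generalizing acc with
  | nil => simp
  | cons h tl ih =>
    simp only [List.foldl_cons, List.mem_cons]
    rw [ih]
    split_ifs with hc
    · rw [PySem.Set.mem_add]
      constructor
      · rintro ((h1 | h1) | ⟨t, ht, h2, h3⟩)
        · exact Or.inl h1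
        · exact Or.inr ⟨h, Or.inl rfl, hc, h1.symm⟩
        · exact Or.inr ⟨t, Or.inr ht, h2, h3⟩
      · rintro (h1 | ⟨t, ht | ht, h2, h3⟩)
        · exact Or.inl (Or.inl h1)
        · exact Or.inl (Or.inr (by subst ht; exact h3.symm))
        · exact Or.inr ⟨t, ht, h2, h3⟩
    · constructor
      · rintro (h1 | ⟨t, ht, h2, h3⟩)
        · exact Or.inl h1
        · exact Or.inr ⟨t, Or.inr ht, h2, h3⟩
      · rintro (h1 | ⟨t, ht | ht, h2, h3⟩)
        · exact Or.inl h1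
        · exact absurd h2 (by subst ht; simpa using hc)
        · exact Or.inr ⟨t, ht, h2, h3⟩

lemma pv_nodup_fold (pts : List String) (acc : List String) (hacc : acc.Nodup) :
    (pts.foldl (fun uses t =>
      if pvUseMap.contains (pvLstripQ t) then PySem.Set.add uses (pvUseMap.getD (pvLstripQ t) "") else uses) acc).Nodup := by
  induction pts generalizing acc with
  | nil => simpa
  | cons h tl ih =>
    simp only [List.foldl_cons]
    apply ih
    split_ifs with hc
    · exact PySem.Set.nodup_add _ _ hacc
    · exact hacc

-- the ∃-form of A's set membership, split by which key matched
lemma pv_exists_distrib (pts : List String) (x : String) :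
    (∃ t ∈ pts, pvUseMap.contains (pvLstripQ t) = true ∧ pvUseMap.getD (pvLstripQ t) "" = x) ↔
    ((∃ t ∈ pts, pvLstripQ t = "DateTimeImmutable") ∧ x = "use DateTimeImmutable;") ∨
    ((∃ t ∈ pts, pvLstripQ t = "DateTimeInterface") ∧ x = "use DateTimeInterface;") ∨
    ((∃ t ∈ pts, pvLstripQ t = "DateTime") ∧ x = "use DateTime;") := by
  constructor
  · rintro ⟨t, ht, hc⟩
    rcases (pv_map_char _ x).1 hc with ⟨h, rfl⟩ | ⟨h, rfl⟩ | ⟨h, rfl⟩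
    · exact Or.inl ⟨⟨t, ht, h⟩, rfl⟩
    · exact Or.inr (Or.inl ⟨⟨t, ht, h⟩, rfl⟩)
    · exact Or.inr (Or.inr ⟨⟨t, ht, h⟩, rfl⟩)
  · rintro (⟨⟨t, ht, h⟩, rfl⟩ | ⟨⟨t, ht, h⟩, rfl⟩ | ⟨⟨t, ht, h⟩, rfl⟩)
    · exact ⟨t, ht, (pv_map_char _ _).2 (Or.inl ⟨h, rfl⟩)⟩
    · exact ⟨t, ht, (pv_map_char _ _).2 (Or.inr (Or.inl ⟨h, rfl⟩))⟩
    · exact ⟨t, ht, (pv_map_char _ _).2 (Or.inr (Or.inr ⟨h, rfl⟩))⟩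

-- membership in B's filtered list, split the same way
lemma pv_R_char (pts : List String) (x : String) :
    x ∈ pvUseMap.items.filterMap (fun kv =>
      if PySem.Set.contains (PySem.Set.ofList (pts.map pvLstripQ)) kv.1 then some kv.2 else none) ↔
    ((∃ t ∈ pts, pvLstripQ t = "DateTimeImmutable") ∧ x = "use DateTimeImmutable;") ∨
    ((∃ t ∈ pts, pvLstripQ t = "DateTimeInterface") ∧ x = "use DateTimeInterface;") ∨
    ((∃ t ∈ pts, pvLstripQ t = "DateTime") ∧ x = "use DateTime;") := by
  rw [show pvUseMap.items = [("DateTimeImmutable", "use DateTimeImmutable;"),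
     ("DateTimeInterface", "use DateTimeInterface;"),
     ("DateTime", "use DateTime;")] from rfl]
  by_cases dc1 : ∃ t ∈ pts, pvLstripQ t = "DateTimeImmutable" <;>
    by_cases dc2 : ∃ t ∈ pts, pvLstripQ t = "DateTimeInterface" <;>
      by_cases dc3 : ∃ t ∈ pts, pvLstripQ t = "DateTime" <;>
        simp [dc1, dc2, dc3]

-- B's filtered list has no duplicates (the three use-lines are distinct)
lemma pv_nodup_R (pts : List String) :
    (pvUseMap.items.filterMap (fun kv =>
      if PySem.Set.contains (PySem.Set.ofList (pts.map pvLstripQ)) kv.1 then some kv.2 else none)).Nodup := by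
  rw [show pvUseMap.items = [("DateTimeImmutable", "use DateTimeImmutable;"),
     ("DateTimeInterface", "use DateTimeInterface;"),
     ("DateTime", "use DateTime;")] from rfl]
  simp only [List.filterMap_cons, List.filterMap_nil]
  split_ifs <;> simp

-- ===== VERDICT (by name: the statement is the Claim_ definition above) =====
theorem collect_uses_spec : Claim_equal_collect_uses := by
  intro pts _
  unfold Spec_collect_uses
  simp only [collect_uses, collect_uses_alt]
  set S := pts.foldl (fun uses t =>
      if pvUseMap.contains (pvLstripQ t) then PySem.Set.add uses (pvUseMap.getD (pvLstripQ t) "") else uses)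
      PySem.Set.empty with hS
  set R := pvUseMap.items.filterMap (fun kv =>
      if PySem.Set.contains (PySem.Set.ofList (pts.map pvLstripQ)) kv.1 then some kv.2 else none) with hR
  have hmemS : ∀ x, x ∈ S ↔ x ∈ R := by
    intro x
    rw [hS, pv_mem_fold, hR, pv_R_char, pv_exists_distrib]
    simp [PySem.Set.empty]
  have hndS : S.Nodup := pv_nodup_fold pts _ (by simp [PySem.Set.empty])
  have hndR : R.Nodup := pv_nodup_R pts
  have hperm : S.Perm R := (List.perm_ext_iff_of_nodup hndS hndR).2 hmemS
  have hsort : PySem.List.sorted S (fun x => x) false = PySem.List.sorted R (fun x => x) false :=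
    PySem.List.sorted_eq_sorted_of_perm S R (fun x => x) (fun a b h => h) hperm
  by_cases hnil : S = ([] : List String)
  · have hRnil : R = [] := List.Perm.eq_nil (hnil ▸ hperm).symm
    simp [hnil, hRnil, PySem.List.sorted_eq_nil_iff]
  · simp [hnil, hsort]
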